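-- pv_equiv track=rewrite | github.com/daniel-reich/ubiquitous-fiesta | 87YxyfFJ4cw4DsrvB_10.py | generate_rug
-- ===== SOURCE A (Python) =====
-- def generate_rug(n):
--   if n == 1:
--     return [[0]]
--   else:
--     result = []
--     a = n // 2
--     for i in range(n):
--       temp = []
--       for j in range(n):
--         b = abs(a-i)
--         c = abs(a-j)
--         if b > c:
--           d = b
--         else:
--           d = c
--         temp.append(d)
--       result.append(temp)
--     return result
-- ===== SOURCE B (Python) =====
-- def generate_rug(n):
--     a = n // 2
--     rows = []
--     for i in range(n):
--         b = abs(a - i)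
--         row = (list(range(a, b, -1))
--                + [b] * (min(a + b, n - 1) - (a - b) + 1)
--                + list(range(b + 1, n - a)))
--         rows.append(row)
--     return rows
-- ===== Notes on version B (the rewrite author's own statement) =====
-- stated objective: alternative
-- what changed: Each row is built as a concatenation of three arithmetic segments (a descending run a..b+1, a flat run of b copies of b, an ascending run b+1..n-1-a) via range/replicate, replacing A's inner per-cell loop with abs/branch/append per cell.
import Mathlib
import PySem

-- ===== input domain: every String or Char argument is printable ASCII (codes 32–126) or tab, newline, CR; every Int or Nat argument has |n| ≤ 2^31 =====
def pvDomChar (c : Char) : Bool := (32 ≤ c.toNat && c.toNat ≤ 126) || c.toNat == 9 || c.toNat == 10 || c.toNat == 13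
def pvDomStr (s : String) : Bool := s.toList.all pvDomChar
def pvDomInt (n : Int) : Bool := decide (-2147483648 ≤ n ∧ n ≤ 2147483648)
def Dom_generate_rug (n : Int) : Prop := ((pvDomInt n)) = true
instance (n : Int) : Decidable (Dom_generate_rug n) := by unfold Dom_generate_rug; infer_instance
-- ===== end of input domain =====

-- B builds each row as three arithmetic segments (descending run, flat run, ascending run)
-- instead of A's per-cell max computation: objective 'alternative' (different decomposition).

-- ===== PORT A =====
def generate_rug (n : Int) : List (List Int) :=
  if n == 1 then [[0]]
  else
    let a := PySem.Int.floordiv n 2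
    (PySem.List.pyRange 0 n 1).foldl (fun result i =>
      result ++ [(PySem.List.pyRange 0 n 1).foldl (fun temp j =>
        let b := |a - i|
        let c := |a - j|
        let d := if b > c then b else c
        temp ++ [d]) []]) []

-- ===== PORT B =====
def generate_rug_alt (n : Int) : List (List Int) :=
  let a := PySem.Int.floordiv n 2
  (PySem.List.pyRange 0 n 1).foldl (fun rows i =>
    let b := |a - i|
    let row := PySem.List.pyRange a b (-1)
      ++ List.replicate (min (a + b) (n - 1) - (a - b) + 1).toNat b
      ++ PySem.List.pyRange (b + 1) (n - a) 1
    rows ++ [row]) []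

-- ===== PRECONDITION & SPEC =====
def Spec_generate_rug (n : Int) (out : List (List Int)) : Prop := out = generate_rug_alt n
instance (n : Int) (out : List (List Int)) : Decidable (Spec_generate_rug n out) := by unfold Spec_generate_rug; infer_instance

-- ===== CLAIM (what is proved, stated in full; the proofs are below) =====
def Claim_equal_generate_rug : Prop := ∀ (n : Int), Dom_generate_rug n → Spec_generate_rug n (generate_rug n)

-- ===== LEMMAS AND PROOFS =====

-- congruence for maps over List.range with equal bounds
lemma map_range_eq {N M : Nat} {f g : Nat → Int} (hNM : N = M)
    (h : ∀ k, k < N → f k = g k) : (List.range N).map f = (List.range M).map g := by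
  subst hNM
  exact List.map_congr_left (fun k hk => h k (List.mem_range.mp hk))

-- A's inner loop as a map over the column range.
lemma rowA_eq_map (n a i : Int) :
    (PySem.List.pyRange 0 n 1).foldl (fun temp j =>
        let b := |a - i|
        let c := |a - j|
        let d := if b > c then b else c
        temp ++ [d]) []
    = (PySem.List.pyRange 0 n 1).map
        (fun j => if |a - i| > |a - j| then |a - i| else |a - j|) := by
  simpa using PySem.List.foldl_append_singleton_eq_map
    (f := fun j => if |a - i| > |a - j| then |a - i| else |a - j|)
    (l := PySem.List.pyRange 0 n 1) (acc := [])

-- Row equality: A's per-cell max row equals B's three-segment row, given a = n // 2.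
lemma row_eq (n a i : Int) (ha : 2 * a ≤ n) (hb : n ≤ 2 * a + 1)
    (h0 : 0 ≤ i) (hn : i < n) :
    (PySem.List.pyRange 0 n 1).map
        (fun j => if |a - i| > |a - j| then |a - i| else |a - j|)
    = PySem.List.pyRange a |a - i| (-1)
      ++ List.replicate (min (a + |a - i|) (n - 1) - (a - |a - i|) + 1).toNat |a - i|
      ++ PySem.List.pyRange (|a - i| + 1) (n - a) 1 := by
  set b := |a - i| with hbdef
  have hbc : b = a - i ∨ b = -(a - i) := abs_choice (a - i)
  have hb0 : 0 ≤ b := abs_nonneg _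
  have hba : b ≤ a := by omega
  -- split the column range at a - b and at min (a+b+1) n
  have hsplit : PySem.List.pyRange 0 n 1
      = PySem.List.pyRange 0 (a - b) 1 ++ PySem.List.pyRange (a - b) (min (a + b + 1) n) 1
        ++ PySem.List.pyRange (min (a + b + 1) n) n 1 := by
    rw [PySem.List.pyRange_one_append 0 (min (a + b + 1) n) n (by omega) (by omega),
        PySem.List.pyRange_one_append 0 (a - b) (min (a + b + 1) n) (by omega) (by omega)]
  rcases hbc with hbc | hbc <;>
  · rw [hsplit, List.map_append, List.map_append]
    congr 1
    · congr 1
      · -- descending segment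
        rw [PySem.List.pyRange_one, PySem.List.pyRange_neg_one, List.map_map]
        apply map_range_eq (by omega)
        intro k hk
        simp only [Function.comp_apply]
        rcases abs_cases (a - ((0 : Int) + (k : Int))) with ⟨h1, _⟩ | ⟨h1, _⟩ <;>
          rw [h1] <;> split_ifs <;> omega
      · -- flat segment
        rw [PySem.List.pyRange_one, List.map_map,
            show List.replicate (min (a + b) (n - 1) - (a - b) + 1).toNat b
               = (List.range (min (a + b) (n - 1) - (a - b) + 1).toNat).map (fun _ => b) by
              simp [List.map_const']]
        apply map_range_eq (by omega)
        intro k hk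
        simp only [Function.comp_apply]
        rcases abs_cases (a - (a - b + (k : Int))) with ⟨h1, _⟩ | ⟨h1, _⟩ <;>
          rw [h1] <;> split_ifs <;> omega
    · -- ascending segment
      rw [PySem.List.pyRange_one, PySem.List.pyRange_one, List.map_map]
      apply map_range_eq (by omega)
      intro k hk
      simp only [Function.comp_apply]
      rcases abs_cases (a - (min (a + b + 1) n + (k : Int))) with ⟨h1, _⟩ | ⟨h1, _⟩ <;>
        rw [h1] <;> split_ifs <;> omega

-- ===== VERDICT (by name: the statement is the Claim_ definition above) =====
theorem generate_rug_spec : Claim_equal_generate_rug := by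
  intro n _
  show generate_rug n = generate_rug_alt n
  by_cases h1 : n = 1
  · subst h1; decide
  · have hfd : PySem.Int.floordiv n 2 = n / 2 :=
      PySem.Int.floordiv_eq_ediv_of_pos (by omega)
    simp only [generate_rug, generate_rug_alt]
    rw [if_neg (show ¬((n == 1) = true) by simpa using h1)]
    rw [PySem.List.foldl_append_singleton_eq_map, PySem.List.foldl_append_singleton_eq_map]
    simp only [List.nil_append]
    apply List.map_congr_left
    intro i hi
    rw [PySem.List.mem_pyRange_one] at hi
    rw [rowA_eq_map]
    exact row_eq n (PySem.Int.floordiv n 2) i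
      (by rw [hfd]; omega) (by rw [hfd]; omega) hi.1 hi.2
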